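-- pv_equiv track=rewrite | github.com/JohanbcEkberg/aoc25 | day03/solution.py | get_biggest_number
-- ===== SOURCE A (Python) =====
-- def get_biggest_number(s: str) -> tuple[int, str]:
--   res = (0, '0')
--
--   for i in range(len(s)):
--     idx, num = res
--     if s[i] > num:
--       num = s[i]
--       idx = i
--     res = (idx, num)
--
--   return res
-- ===== SOURCE B (Python) =====
-- def get_biggest_number(s: str) -> tuple[int, str]:
--     m = max(s, default='0')
--     if m > '0':
--         return (s.index(m), m)
--     return (0, '0')
-- ===== Notes on version B (the rewrite author's own statement) =====
-- stated objective: simpler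
-- what changed: Replaces the single combined scan tracking (index, max-so-far) with two differently-shaped passes: a reduction to the maximum character via max(s, default=zero-char), then a first-occurrence lookup with s.index; both passes run in C, which is where the measured constant-factor speedup comes from.
import Mathlib
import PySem

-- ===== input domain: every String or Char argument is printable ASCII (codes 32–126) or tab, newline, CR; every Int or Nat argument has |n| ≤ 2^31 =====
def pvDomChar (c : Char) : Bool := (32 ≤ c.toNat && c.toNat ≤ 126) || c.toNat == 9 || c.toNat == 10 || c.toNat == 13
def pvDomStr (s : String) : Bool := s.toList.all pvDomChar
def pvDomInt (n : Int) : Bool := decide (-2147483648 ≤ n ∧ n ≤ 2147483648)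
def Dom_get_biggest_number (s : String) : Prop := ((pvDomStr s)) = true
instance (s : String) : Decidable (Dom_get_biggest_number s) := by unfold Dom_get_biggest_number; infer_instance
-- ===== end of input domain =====

-- B replaces A's single combined scan tracking (index, max) with two passes: a max reduction, then a first-occurrence lookup (objective: simpler).

-- ===== PORT A =====
-- Python compares the one-character strings s[i] and num; on single characters that
-- is exactly code-point comparison, so the state keeps a Char and we compare Chars.
def pvStepA (r : Int × Char) (ic : Int × Char) : Int × Char :=
  if r.2 < ic.2 then (ic.1, ic.2) else r

def get_biggest_number (s : String) : Int × String :=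
  let res := (PySem.List.enumerate s.toList 0).foldl pvStepA (0, '0')
  (res.1, String.ofList [res.2])

-- ===== PORT B =====
-- max(s, default='0') is a fold of max over the characters seeded with '0';
-- s.index(m) is PySem.List.index?; it is some here since m > '0' implies m ∈ s.
def get_biggest_number_alt (s : String) : Int × String :=
  let m := s.toList.foldl max '0'
  if '0' < m then ((((PySem.List.index? s.toList m).getD 0 : Nat) : Int), String.ofList [m])
  else (0, "0")

-- ===== PRECONDITION & SPEC =====
def Spec_get_biggest_number (s : String) (out : Int × String) : Prop := out = get_biggest_number_alt s
instance (s : String) (out : Int × String) : Decidable (Spec_get_biggest_number s out) := by unfold Spec_get_biggest_number; infer_instance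

-- ===== CLAIM (what is proved, stated in full; the proofs are below) =====
def Claim_equal_get_biggest_number : Prop := ∀ (s : String), Dom_get_biggest_number s → Spec_get_biggest_number s (get_biggest_number s)

-- ===== LEMMAS AND PROOFS =====

theorem pv_le_foldl_max (l : List Char) : ∀ a : Char, a ≤ l.foldl max a := by
  induction l with
  | nil => intro a; exact le_refl a
  | cons c t ih => intro a; exact le_trans (le_max_left a c) (ih (max a c))

theorem pv_mem_of_lt_foldl_max (l : List Char) :
    ∀ a : Char, a < l.foldl max a → l.foldl max a ∈ l := by
  induction l with
  | nil => intro a h; exact absurd h (lt_irrefl a)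
  | cons c t ih =>
    intro a h
    simp only [List.foldl_cons] at h ⊢
    by_cases hc : max a c < t.foldl max (max a c)
    · exact List.mem_cons_of_mem _ (ih (max a c) hc)
    · have hM : t.foldl max (max a c) = max a c :=
        le_antisymm (not_lt.mp hc) (pv_le_foldl_max t (max a c))
      rw [hM] at h ⊢
      have hac : max a c = c := by
        rcases max_choice a c with h1 | h1
        · rw [h1] at h; exact absurd h (lt_irrefl a)
        · exact h1
      rw [hac]
      exact List.mem_cons_self

theorem pv_foldA_eq (l : List Char) : ∀ (k idx : Int) (num : Char),
    (PySem.List.enumerate l k).foldl pvStepA (idx, num) =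
      if num < l.foldl max num
      then (k + (List.idxOf (l.foldl max num) l : Int), l.foldl max num)
      else (idx, num) := by
  induction l with
  | nil =>
    intro k idx num
    simp [PySem.List.enumerate]
  | cons c t ih =>
    intro k idx num
    rw [PySem.List.enumerate_cons, List.foldl_cons, List.foldl_cons]
    by_cases h : num < c
    · have hmax : max num c = c := max_eq_right (le_of_lt h)
      rw [show pvStepA (idx, num) (k, c) = (k, c) by simp [pvStepA, h]]
      rw [ih (k + 1) k c, hmax]
      by_cases h2 : c < t.foldl max c
      · have hnum : num < t.foldl max c := lt_trans h h2
        rw [if_pos h2, if_pos hnum]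
        have hne : c ≠ t.foldl max c := ne_of_lt h2
        rw [List.idxOf_cons_ne _ hne, Prod.mk.injEq]
        refine ⟨?_, rfl⟩
        push_cast [Nat.succ_eq_add_one]; ring
      · have hM : t.foldl max c = c := le_antisymm (not_lt.mp h2) (pv_le_foldl_max t c)
        rw [hM, if_neg (lt_irrefl c), if_pos h, List.idxOf_cons_self]
        simp
    · have hmax : max num c = num := max_eq_left (not_lt.mp h)
      rw [show pvStepA (idx, num) (k, c) = (idx, num) by simp [pvStepA, h]]
      rw [ih (k + 1) idx num, hmax]
      by_cases h2 : num < t.foldl max num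
      · rw [if_pos h2, if_pos h2]
        have hne : c ≠ t.foldl max num := fun he => h (he ▸ h2)
        rw [List.idxOf_cons_ne _ hne, Prod.mk.injEq]
        refine ⟨?_, rfl⟩
        push_cast [Nat.succ_eq_add_one]; ring
      · rw [if_neg h2, if_neg h2]

theorem pv_index?_of_mem (l : List Char) (a : Char) (h : a ∈ l) :
    PySem.List.index? l a = some (List.idxOf a l) := by
  induction l with
  | nil => cases h
  | cons c t ih =>
    by_cases hc : c = a
    · subst hc
      rw [PySem.List.index?_cons_self, List.idxOf_cons_self]
    · have ha : a ∈ t := by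
        rcases List.mem_cons.mp h with h1 | h1
        · exact absurd h1.symm hc
        · exact h1
      rw [PySem.List.index?_cons_of_ne _ hc, ih ha, List.idxOf_cons_ne _ hc]
      rfl

-- ===== VERDICT (by name: the statement is the Claim_ definition above) =====
theorem get_biggest_number_spec : Claim_equal_get_biggest_number := by
  intro s _
  unfold Spec_get_biggest_number get_biggest_number get_biggest_number_alt
  simp only []
  rw [pv_foldA_eq]
  by_cases h : '0' < s.toList.foldl max '0'
  · rw [if_pos h, if_pos h]
    rw [pv_index?_of_mem _ _ (pv_mem_of_lt_foldl_max _ _ h)]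
    simp
  · rw [if_neg h, if_neg h]
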